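-- pv_equiv track=rewrite | github.com/matt-e-builds/karpenter-ai-agent | src/karpenter_ai_agent/rag/store.py | _extract_doc_metadata
-- ===== SOURCE A (Python) =====
-- from typing import Dict, Iterable, List
--
-- def _extract_doc_metadata(lines: List[str]) -> tuple[str, str]:
--     title = "Karpenter docs"
--     source_url = ""
--     for line in lines:
--         if line.startswith("# "):
--             title = line[2:].strip()
--         if line.lower().startswith("source:"):
--             source_url = line.split(":", 1)[1].strip()
--     return title, source_url
-- ===== SOURCE B (Python) =====
-- def _extract_doc_metadata(lines):
--     title = None
--     source = None
--     for line in reversed(lines):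
--         if title is None and line.startswith("# "):
--             title = line[2:].strip()
--         if source is None and line.lower().startswith("source:"):
--             source = line.split(":", 1)[1].strip()
--         if title is not None and source is not None:
--             break
--     return (title if title is not None else "Karpenter docs",
--             source if source is not None else "")
-- ===== Notes on version B (the rewrite author's own statement) =====
-- stated objective: alternative
-- what changed: B scans the lines in reverse keeping Option fields and breaks out of the loop as soon as both title and source are found (first match in reverse = A's last-match-wins forward fold), instead of A's unconditional forward pass that overwrites both fields.
import Mathlib
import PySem

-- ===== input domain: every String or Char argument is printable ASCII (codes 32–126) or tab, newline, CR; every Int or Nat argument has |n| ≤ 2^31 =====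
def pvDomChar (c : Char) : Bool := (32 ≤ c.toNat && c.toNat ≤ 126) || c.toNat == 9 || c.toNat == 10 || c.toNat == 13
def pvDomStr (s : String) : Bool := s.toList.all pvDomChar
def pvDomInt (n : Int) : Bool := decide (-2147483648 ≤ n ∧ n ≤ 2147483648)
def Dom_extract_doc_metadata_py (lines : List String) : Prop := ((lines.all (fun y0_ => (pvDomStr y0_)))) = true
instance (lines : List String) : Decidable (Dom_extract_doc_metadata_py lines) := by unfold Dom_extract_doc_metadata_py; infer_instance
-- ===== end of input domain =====

-- B scans the lines in reverse with an early break once both fields are found (same values, different control flow); objective: alternative.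

-- ===== PORT A =====
-- forward fold over the lines, last match wins for each field
def extract_doc_metadata_py (lines : List String) : String × String :=
  lines.foldl (fun acc line =>
    let acc := if PySem.Str.startswith line "# "
      then (PySem.Str.strip (PySem.Str.slice line (some 2) none), acc.2) else acc
    let acc := if PySem.Str.startswith (PySem.Str.lower line) "source:"
      then (acc.1, PySem.Str.strip ((PySem.List.pyGet?
              ((PySem.Str.splitMax? line ":" 1).getD []) 1).getD ""))
      else acc
    acc) ("Karpenter docs", "")

-- ===== PORT B =====
-- reversed scan: first match (in reverse) fills an Option field; break when both filled
def extract_doc_metadata_py_altLoop : List String → Option String → Option String → Option String × Option String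
  | [], title, source => (title, source)
  | line :: rest, title, source =>
    let title := if title.isNone && PySem.Str.startswith line "# "
      then some (PySem.Str.strip (PySem.Str.slice line (some 2) none)) else title
    let source := if source.isNone && PySem.Str.startswith (PySem.Str.lower line) "source:"
      then some (PySem.Str.strip ((PySem.List.pyGet?
              ((PySem.Str.splitMax? line ":" 1).getD []) 1).getD "")) else source
    if title.isSome && source.isSome then (title, source)
    else extract_doc_metadata_py_altLoop rest title source

def extract_doc_metadata_py_alt (lines : List String) : String × String :=
  let r := extract_doc_metadata_py_altLoop lines.reverse none none
  (r.1.getD "Karpenter docs", r.2.getD "")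

-- ===== PRECONDITION & SPEC =====
def Spec_extract_doc_metadata_py (lines : List String) (out : String × String) : Prop := out = extract_doc_metadata_py_alt lines
instance (lines : List String) (out : String × String) : Decidable (Spec_extract_doc_metadata_py lines out) := by unfold Spec_extract_doc_metadata_py; infer_instance

-- ===== CLAIM (what is proved, stated in full; the proofs are below) =====
def Claim_equal_extract_doc_metadata_py : Prop := ∀ (lines : List String), Dom_extract_doc_metadata_py lines → Spec_extract_doc_metadata_py lines (extract_doc_metadata_py lines)

-- ===== LEMMAS AND PROOFS =====

-- A's forward fold computes, for each field, the image of the LAST matching line (= first in reverse).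
theorem pvFoldlChar (pT pS : String → Bool) (fT fS : String → String) :
    ∀ (xs : List String) (t s : String),
    xs.foldl (fun acc line =>
      let acc := if pT line then (fT line, acc.2) else acc
      let acc := if pS line then (acc.1, fS line) else acc
      acc) (t, s)
    = (((xs.reverse.find? pT).map fT).getD t, ((xs.reverse.find? pS).map fS).getD s) := by
  intro xs
  induction xs with
  | nil => intro t s; simp
  | cons l ls ih =>
    intro t s
    simp only [List.foldl_cons, List.reverse_cons, List.find?_append]
    by_cases hT : pT l <;> by_cases hS : pS l <;>
      simp [ih, hT, hS, Option.or] <;>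
      rcases h1 : ls.reverse.find? pT with _ | _ <;>
      rcases h2 : ls.reverse.find? pS with _ | _ <;>
      simp

-- B's loop (with early break) computes the same first-match-in-its-input semantics.
theorem pvLoopChar :
    ∀ (xs : List String) (t s : Option String),
    extract_doc_metadata_py_altLoop xs t s
    = (t.or (((xs.find? (fun l => PySem.Str.startswith l "# ")).map
          (fun l => PySem.Str.strip (PySem.Str.slice l (some 2) none)))),
       s.or (((xs.find? (fun l => PySem.Str.startswith (PySem.Str.lower l) "source:")).map
          (fun l => PySem.Str.strip ((PySem.List.pyGet?
              ((PySem.Str.splitMax? l ":" 1).getD []) 1).getD ""))))) := by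
  intro xs
  induction xs with
  | nil => intro t s; simp [extract_doc_metadata_py_altLoop]
  | cons l ls ih =>
    intro t s
    rw [extract_doc_metadata_py_altLoop]
    by_cases hT : PySem.Str.startswith l "# " <;>
      by_cases hS : PySem.Str.startswith (PySem.Str.lower l) "source:" <;>
      simp at hT hS <;>
      rcases t with _ | a <;> rcases s with _ | b <;>
      simp [ih, hT, hS, Option.or]

-- ===== VERDICT (by name: the statement is the Claim_ definition above) =====
theorem extract_doc_metadata_py_spec : Claim_equal_extract_doc_metadata_py := by
  intro lines _
  unfold Spec_extract_doc_metadata_py extract_doc_metadata_py extract_doc_metadata_py_alt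
  rw [pvFoldlChar (fun l => PySem.Str.startswith l "# ")
        (fun l => PySem.Str.startswith (PySem.Str.lower l) "source:")
        (fun l => PySem.Str.strip (PySem.Str.slice l (some 2) none))
        (fun l => PySem.Str.strip ((PySem.List.pyGet?
            ((PySem.Str.splitMax? l ":" 1).getD []) 1).getD "")),
      pvLoopChar]
  rcases h1 : lines.reverse.find? (fun l => PySem.Str.startswith l "# ") with _ | _ <;>
    rcases h2 : lines.reverse.find? (fun l => PySem.Str.startswith (PySem.Str.lower l) "source:") with _ | _ <;>
    simp [Option.or]
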